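-- pv_equiv track=rewrite | github.com/1LStopBudapest/Helper | Binning_BKVal.py | findCR2BinIndexVal1
-- ===== SOURCE A (Python) =====
-- MT_bin = [0, 60, 95, 130, -1]
--
-- def findCR2BinIndexVal1( MT):
--     idx = -1
--     pickIdx = -1
--     for j in range(len(MT_bin)-1):
--         cut1 = MT>MT_bin[j] if j == len(MT_bin)-2 else MT>MT_bin[j] and MT<=MT_bin[j+1]
--         idx += 1
--         if cut1:
--             pickIdx = idx
--             break
--
--     return pickIdx
-- ===== SOURCE B (Python) =====
-- import bisect
--
-- def findCR2BinIndexVal1(MT):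
--     return bisect.bisect_left([0, 60, 95, 130], MT) - 1
-- ===== Notes on version B (the rewrite author's own statement) =====
-- stated objective: idiomatic
-- what changed: Replaces the linear scan with per-branch interval tests by a single bisect_left call on the sorted boundary list, shifted by -1.
import Mathlib
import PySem

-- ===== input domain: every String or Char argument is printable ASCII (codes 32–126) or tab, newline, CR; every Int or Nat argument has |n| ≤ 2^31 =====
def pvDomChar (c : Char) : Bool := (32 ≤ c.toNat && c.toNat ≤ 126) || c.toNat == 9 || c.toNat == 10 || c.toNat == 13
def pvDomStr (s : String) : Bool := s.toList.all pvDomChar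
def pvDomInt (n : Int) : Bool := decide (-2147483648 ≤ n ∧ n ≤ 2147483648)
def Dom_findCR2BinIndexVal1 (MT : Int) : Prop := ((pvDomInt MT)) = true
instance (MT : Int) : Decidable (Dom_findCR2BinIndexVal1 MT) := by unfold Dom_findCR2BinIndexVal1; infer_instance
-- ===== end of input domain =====

-- B replaces A's linear scan over the bins by one bisect_left on the sorted boundaries (idiomatic).

-- ===== PORT A =====
def MT_binA : List Int := [0, 60, 95, 130, -1]

-- the for-loop over range(len(MT_bin)-1) with early break
def pvLoopA (MT : Int) : List Int → Int → Int → Int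
  | [], _, pick => pick
  | j :: rest, idx, pick =>
    let cut1 : Bool :=
      if j = (MT_binA.length : Int) - 2 then
        decide (MT > (PySem.List.pyGetD MT_binA j 0))
      else
        decide (MT > (PySem.List.pyGetD MT_binA j 0)) && decide (MT ≤ (PySem.List.pyGetD MT_binA (j+1) 0))
    let idx' := idx + 1
    if cut1 then idx' else pvLoopA MT rest idx' pick

def findCR2BinIndexVal1 (MT : Int) : Int :=
  pvLoopA MT (PySem.List.pyRange 0 ((MT_binA.length : Int) - 1) 1) (-1) (-1)

-- ===== PORT B =====
-- bisect.bisect_left on a sorted list = number of elements strictly below MT (library call ported by its contract)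
def findCR2BinIndexVal1_alt (MT : Int) : Int :=
  (((([0, 60, 95, 130] : List Int).takeWhile (fun b => b < MT)).length : Int)) - 1

-- ===== PRECONDITION & SPEC =====
def Spec_findCR2BinIndexVal1 (MT : Int) (out : Int) : Prop := out = findCR2BinIndexVal1_alt MT
instance (MT : Int) (out : Int) : Decidable (Spec_findCR2BinIndexVal1 MT out) := by unfold Spec_findCR2BinIndexVal1; infer_instance

-- ===== CLAIM (what is proved, stated in full; the proofs are below) =====
def Claim_equal_findCR2BinIndexVal1 : Prop := ∀ (MT : Int), Dom_findCR2BinIndexVal1 MT → Spec_findCR2BinIndexVal1 MT (findCR2BinIndexVal1 MT)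

-- ===== LEMMAS AND PROOFS =====

-- ===== VERDICT (by name: the statement is the Claim_ definition above) =====
theorem findCR2BinIndexVal1_spec : Claim_equal_findCR2BinIndexVal1 := by
  intro MT _
  unfold Spec_findCR2BinIndexVal1 findCR2BinIndexVal1 findCR2BinIndexVal1_alt
  have h : PySem.List.pyRange 0 ((MT_binA.length : Int) - 1) 1 = [0, 1, 2, 3] := by decide
  rw [h]
  norm_num [pvLoopA, PySem.List.pyGetD, PySem.List.pyGet?, PySem.List.pyIdx?, MT_binA,
    List.takeWhile]
  by_cases h0 : 0 < MT <;> by_cases h1 : 60 < MT <;> by_cases h2 : 95 < MT <;>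
    by_cases h3 : 130 < MT <;> simp [h0, h1, h2, h3] <;> omega
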